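-- pv_equiv track=rewrite | github.com/scdawson789/scdawson789 | crime_data_Dawson.py | crimes_not_found_by_keywords
-- ===== SOURCE A (Python) =====
-- def crimes_not_found_by_keywords(crimes, keywords):
--     '''
--     Function: crimes_not_found_by_keywords
--     Input: list of crimes and keywords
--     Output: Which offense are found by keywords (retained in the data)
--     which offenses are not found by keywords (filtered out of the data)
--     '''
--     found_items = []
--     not_found = []
--     found = False
--     for crime in crimes:
--         for key in keywords:
--             found = crime.lower().count(key.lower())
--             if found > 0:
--                 found = True
--                 break
--         if found:
--             found_items.append(crime)
--         else:
--             not_found.append(crime)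
--     return not_found, found_items
-- ===== SOURCE B (Python) =====
-- def crimes_not_found_by_keywords(crimes, keywords):
--     '''Partition crimes by keyword hit using a hash set of lowered keywords and
--     sliding windows over each crime: the inner scan over keywords becomes a set
--     lookup per window, done once per (position, distinct keyword length).'''
--     keyset = {k.lower() for k in keywords}
--     lengths = sorted({len(k) for k in keyset})
--     not_found = []
--     found_items = []
--     for crime in crimes:
--         c = crime.lower()
--         n = len(c)
--         if any(c[i:i + L] in keyset
--                for L in lengths
--                for i in range(n - L + 1)):
--             found_items.append(crime)
--         else:
--             not_found.append(crime)
--     return not_found, found_items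
-- ===== Notes on version B (the rewrite author's own statement) =====
-- stated objective: faster
-- what changed: Replaces A's inner scan over all keywords per crime by a hash set of lowered keywords built once: each crime is scanned by sliding windows (one per position and distinct keyword length) looked up in the set, so the per-crime cost no longer depends on the number of keywords, only on their distinct lengths.
import Mathlib
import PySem

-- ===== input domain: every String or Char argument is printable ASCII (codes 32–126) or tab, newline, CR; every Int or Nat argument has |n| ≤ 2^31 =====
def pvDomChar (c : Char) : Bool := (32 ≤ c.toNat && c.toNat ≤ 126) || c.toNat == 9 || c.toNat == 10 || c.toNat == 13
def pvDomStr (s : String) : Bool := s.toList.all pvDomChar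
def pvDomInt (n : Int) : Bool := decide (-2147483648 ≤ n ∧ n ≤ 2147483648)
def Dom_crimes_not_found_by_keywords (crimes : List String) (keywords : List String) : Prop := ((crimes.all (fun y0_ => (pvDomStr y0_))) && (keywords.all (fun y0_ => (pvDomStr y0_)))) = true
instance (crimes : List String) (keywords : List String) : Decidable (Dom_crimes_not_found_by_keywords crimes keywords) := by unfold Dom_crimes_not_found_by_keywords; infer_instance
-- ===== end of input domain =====

-- B replaces A's inner scan over keywords by a hash set of lowered keywords looked up
-- once per sliding window (one window per position and distinct keyword length), removing the per-keyword scan; objective: faster (measured).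


-- ===== PORT A =====
-- inner 'for key in keywords' loop: 'found' enters as the value left from the previous
-- crime (Python reuses the variable; int 0 is falsy, so the Bool truthiness is exact)
def innerLoopA (crime : String) : List String → Bool → Bool
  | [], found => found
  | key :: ks, _ =>
      if PySem.Str.count (PySem.Str.lower crime) (PySem.Str.lower key) > 0 then true
      else innerLoopA crime ks false

def crimes_not_found_by_keywords (crimes : List String) (keywords : List String) : List String × List String :=
  let st := crimes.foldl
    (fun (st : List String × List String × Bool) crime =>
      let found := innerLoopA crime keywords st.2.2
      if found then (st.1 ++ [crime], st.2.1, found)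
      else (st.1, st.2.1 ++ [crime], found))
    ([], [], false)
  (st.2.1, st.1)

-- ===== PORT B =====
-- any(c[i:i+L] in keyset for L in lengths for i in range(n - L + 1));
-- '.toNat' on the range bound is exact: Python's range(m) is empty for m ≤ 0
def windowHit (keyset : PySem.Set String) (lengths : List Int) (c : String) : Bool :=
  let n := PySem.Str.len c
  lengths.any (fun L =>
    (List.range (n - L + 1).toNat).any (fun i =>
      PySem.Set.contains keyset (PySem.Str.slice c (some (i : Int)) (some ((i : Int) + L)))))

def crimes_not_found_by_keywords_alt (crimes : List String) (keywords : List String) : List String × List String :=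
  let keyset : PySem.Set String := PySem.Set.ofList (keywords.map PySem.Str.lower)
  let lengths : List Int :=
    PySem.List.sorted (PySem.Set.ofList (keyset.map PySem.Str.len)) (fun x => x) false
  crimes.foldl
    (fun (st : List String × List String) crime =>
      if windowHit keyset lengths (PySem.Str.lower crime)
      then (st.1, st.2 ++ [crime])
      else (st.1 ++ [crime], st.2))
    ([], [])

-- ===== PRECONDITION & SPEC =====
def Spec_crimes_not_found_by_keywords (crimes : List String) (keywords : List String) (out : List String × List String) : Prop := out = crimes_not_found_by_keywords_alt crimes keywords
instance (crimes : List String) (keywords : List String) (out : List String × List String) : Decidable (Spec_crimes_not_found_by_keywords crimes keywords out) := by unfold Spec_crimes_not_found_by_keywords; infer_instance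

-- ===== CLAIM (what is proved, stated in full; the proofs are below) =====
def Claim_equal_crimes_not_found_by_keywords : Prop := ∀ (crimes : List String) (keywords : List String), Dom_crimes_not_found_by_keywords crimes keywords → Spec_crimes_not_found_by_keywords crimes keywords (crimes_not_found_by_keywords crimes keywords)

-- ===== LEMMAS AND PROOFS =====

theorem go_le (sub : List Char) : ∀ (fuel : Nat) (l : List Char) (acc : Nat),
    acc ≤ PySem.Chars.count.go sub fuel l acc := by
  intro fuel
  induction fuel with
  | zero => intro l acc; simp [PySem.Chars.count.go]
  | succ n ih =>
      intro l acc
      cases l with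
      | nil => simp [PySem.Chars.count.go]
      | cons h t =>
          simp only [PySem.Chars.count.go]
          split
          · exact le_trans (Nat.le_succ acc) (ih _ _)
          · exact ih _ _

theorem go_pos_iff (sub : List Char) (hsub : sub ≠ []) :
    ∀ (fuel : Nat) (l : List Char) (acc : Nat), l.length ≤ fuel →
    (acc < PySem.Chars.count.go sub fuel l acc ↔ ∃ j, sub <+: l.drop j) := by
  intro fuel
  induction fuel with
  | zero =>
      intro l acc hl
      have hnil : l = [] := List.length_eq_zero_iff.mp (Nat.le_zero.mp hl)
      subst hnil
      simp [PySem.Chars.count.go, List.prefix_iff_eq_take, hsub]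
  | succ n ih =>
      intro l acc hl
      cases l with
      | nil => simp [PySem.Chars.count.go, List.prefix_iff_eq_take, hsub]
      | cons h t =>
          simp only [PySem.Chars.count.go]
          split
          · rename_i hpre
            constructor
            · intro _
              exact ⟨0, by simpa using List.isPrefixOf_iff_prefix.mp hpre⟩
            · intro _
              exact lt_of_lt_of_le (Nat.lt_succ_self acc) (go_le _ _ _ _)
          · rename_i hpre
            have ht : t.length ≤ n := by simpa using hl
            rw [ih t acc ht]
            constructor
            · rintro ⟨j, hj⟩; exact ⟨j + 1, by simpa using hj⟩
            · rintro ⟨j, hj⟩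
              cases j with
              | zero =>
                  simp only [List.drop_zero] at hj
                  exact absurd (List.isPrefixOf_iff_prefix.mpr hj) (by simpa using hpre)
              | succ j => exact ⟨j, by simpa using hj⟩

theorem chars_count_pos_iff (s sub : List Char) :
    (0 < PySem.Chars.count s sub) ↔ PySem.Chars.isIn sub s = true := by
  by_cases hsub : sub = []
  · subst hsub
    simp [PySem.Chars.count, PySem.Chars.isIn_nil]
  · unfold PySem.Chars.count
    rw [if_neg (by simpa using hsub)]
    rw [go_pos_iff sub hsub s.length s 0 le_rfl]
    exact PySem.Chars.exists_prefix_drop_iff_isIn sub s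

theorem str_count_pos_iff (s sub : String) :
    (0 < PySem.Str.count s sub) ↔ PySem.Str.isIn sub s = true := by
  rw [show PySem.Str.count s sub = PySem.Chars.count s.toList sub.toList from by
        simp [PySem.Str.count_eq],
      show PySem.Str.isIn sub s = PySem.Chars.isIn sub.toList s.toList from by
        simp [PySem.Str.isIn_eq]]
  exact chars_count_pos_iff s.toList sub.toList

-- A's inner loop, started with found = False, is the any-keyword-substring predicate
def anyKey (lowered : List String) (c : String) : Bool :=
  lowered.any (fun k => PySem.Str.isIn k c)

theorem innerLoopA_eq_anyKey (crime : String) (ks : List String) :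
    innerLoopA crime ks false = anyKey (ks.map PySem.Str.lower) (PySem.Str.lower crime) := by
  induction ks with
  | nil => simp [innerLoopA, anyKey]
  | cons k ks ih =>
      have hiff := str_count_pos_iff (PySem.Str.lower crime) (PySem.Str.lower k)
      simp only [innerLoopA, anyKey, List.map_cons, List.any_cons, ih]
      by_cases h : 0 < PySem.Str.count (PySem.Str.lower crime) (PySem.Str.lower k)
      · rw [if_pos h, hiff.mp h, Bool.true_or]
      · have hf : PySem.Str.isIn (PySem.Str.lower k) (PySem.Str.lower crime) = false :=
          Bool.eq_false_iff.mpr (fun he => h (hiff.mpr he))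
        rw [if_neg h, hf, Bool.false_or]

theorem innerLoopA_const (crime : String) (k : String) (ks : List String) (b : Bool) :
    innerLoopA crime (k :: ks) b = innerLoopA crime (k :: ks) false := by
  simp [innerLoopA]

-- B's window predicate is the same any-keyword-substring predicate
theorem slice_toList (c : String) (i L : Nat) :
    (PySem.Str.slice c (some (i:Int)) (some ((i:Int)+(L:Int)))).toList = (c.toList.drop i).take L := by
  simp [PySem.Str.toList_slice, PySem.Chars.slice_eq_listSlice, PySem.List.slice_natCast_add]

theorem window_isIn (c : String) (i L : Nat) :
    PySem.Str.isIn (PySem.Str.slice c (some (i:Int)) (some ((i:Int)+(L:Int)))) c = true := by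
  have h : PySem.Str.isIn (PySem.Str.slice c (some (i:Int)) (some ((i:Int)+(L:Int)))) c
      = PySem.Chars.isIn ((c.toList.drop i).take L) c.toList := by
    rw [← slice_toList c i L]; simp [PySem.Str.isIn_eq]
  rw [h]
  exact (PySem.Chars.exists_prefix_drop_iff_isIn _ _).mp ⟨i, List.take_prefix _ _⟩

theorem windowHit_iff (K : List String) (c : String) :
    windowHit (PySem.Set.ofList K)
      (PySem.List.sorted (PySem.Set.ofList ((PySem.Set.ofList K).map PySem.Str.len)) (fun x => x) false) c
      = anyKey K c := by
  rw [Bool.eq_iff_iff]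
  unfold windowHit anyKey
  simp only [List.any_eq_true, List.mem_range, PySem.List.mem_sorted, PySem.Set.mem_ofList,
    List.mem_map, PySem.Set.contains, List.contains_iff_mem]
  constructor
  · rintro ⟨L, ⟨k0, hk0, hL⟩, i, hi, hw⟩
    refine ⟨_, hw, ?_⟩
    have hL' : L = ((k0.toList.length : Nat) : Int) := by rw [← hL, PySem.Str.len_eq]
    subst hL'
    exact window_isIn c i k0.toList.length
  · rintro ⟨k, hk, hin⟩
    have hin' : PySem.Chars.isIn k.toList c.toList = true := by
      simpa [PySem.Str.isIn_eq] using hin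
    obtain ⟨j, hj⟩ := (PySem.Chars.exists_prefix_drop_iff_isIn _ _).mpr hin'
    refine ⟨PySem.Str.len k, ⟨k, hk, rfl⟩, ?_⟩
    by_cases hnil : k.toList = []
    · refine ⟨0, ?_, ?_⟩
      · rw [PySem.Str.len_eq, PySem.Str.len_eq, hnil]
        simp
      · have heq : PySem.Str.slice c (some ((0:Nat):Int)) (some (((0:Nat):Int) + PySem.Str.len k)) = k := by
          rw [PySem.Str.len_eq, ← String.toList_inj, slice_toList, hnil]
          simp
        rw [heq]; exact hk
    · have hlen : k.toList.length ≤ c.toList.length - j := by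
        have := hj.length_le
        simpa using this
      have hpos : 0 < k.toList.length := List.length_pos_iff.mpr hnil
      refine ⟨j, ?_, ?_⟩
      · rw [PySem.Str.len_eq, PySem.Str.len_eq]
        omega
      · have heq : PySem.Str.slice c (some (j:Int)) (some ((j:Int) + PySem.Str.len k)) = k := by
          rw [PySem.Str.len_eq, ← String.toList_inj, slice_toList]
          exact (List.prefix_iff_eq_take.mp hj).symm
        rw [heq]; exact hk

-- A's fold computes the partition by predicate p
theorem foldA_gen (p : String → Bool) (keywords : List String)
    (hinner : ∀ c b, innerLoopA c keywords b = p c) (crimes : List String) :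
    ∀ (fi nf : List String) (b : Bool),
    ∃ b', crimes.foldl
      (fun (st : List String × List String × Bool) crime =>
        let found := innerLoopA crime keywords st.2.2
        if found then (st.1 ++ [crime], st.2.1, found)
        else (st.1, st.2.1 ++ [crime], found))
      (fi, nf, b)
    = (fi ++ crimes.filter p, nf ++ crimes.filter (fun c => !p c), b') := by
  induction crimes with
  | nil => exact fun fi nf b => ⟨b, by simp⟩
  | cons c cs ih =>
      intro fi nf b
      simp only [List.foldl_cons, hinner c b]
      by_cases hp : p c = true
      · obtain ⟨b', hb'⟩ := ih (fi ++ [c]) nf true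
        exact ⟨b', by simp [hp, hb']⟩
      · have hp' : p c = false := Bool.eq_false_iff.mpr hp
        obtain ⟨b', hb'⟩ := ih fi (nf ++ [c]) false
        exact ⟨b', by simp [hp', hb']⟩

theorem foldA_nil_keywords (crimes : List String) :
    ∀ (fi nf : List String),
    crimes.foldl
      (fun (st : List String × List String × Bool) crime =>
        let found := innerLoopA crime ([] : List String) st.2.2
        if found then (st.1 ++ [crime], st.2.1, found)
        else (st.1, st.2.1 ++ [crime], found))
      (fi, nf, false)
    = (fi, nf ++ crimes, false) := by
  induction crimes with
  | nil => intro fi nf; simp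
  | cons c cs ih =>
      intro fi nf
      have h0 : innerLoopA c [] false = false := rfl
      simp only [List.foldl_cons, h0, Bool.false_eq_true, if_false]
      simpa using ih fi (nf ++ [c])

-- B's fold computes the same partition
theorem foldB_gen (q : String → Bool) (crimes : List String) :
    ∀ (nf fi : List String),
    crimes.foldl
      (fun (st : List String × List String) crime =>
        if q crime then (st.1, st.2 ++ [crime])
        else (st.1 ++ [crime], st.2))
      (nf, fi)
    = (nf ++ crimes.filter (fun c => !q c), fi ++ crimes.filter q) := by
  induction crimes with
  | nil => intro nf fi; simp
  | cons c cs ih =>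
      intro nf fi
      by_cases hq : q c = true
      · simp [hq, ih]
      · have hq' : q c = false := Bool.eq_false_iff.mpr hq
        simp [hq', ih]

-- ===== VERDICT (by name: the statement is the Claim_ definition above) =====
theorem crimes_not_found_by_keywords_spec : Claim_equal_crimes_not_found_by_keywords := by
  intro crimes keywords _
  unfold Spec_crimes_not_found_by_keywords
  unfold crimes_not_found_by_keywords crimes_not_found_by_keywords_alt
  simp only []
  rw [foldB_gen]
  cases keywords with
  | nil =>
      rw [foldA_nil_keywords]
      have hs : PySem.List.sorted ([] : List Int) (fun x => x) false = [] :=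
        (PySem.List.sorted_eq_nil_iff _ _ _).mpr rfl
      simp [windowHit, hs]
  | cons k ks =>
      have hw : ∀ c, windowHit (PySem.Set.ofList ((k :: ks).map PySem.Str.lower))
          (PySem.List.sorted (PySem.Set.ofList ((PySem.Set.ofList ((k :: ks).map PySem.Str.lower)).map PySem.Str.len)) (fun x => x) false)
          (PySem.Str.lower c)
          = anyKey ((k :: ks).map PySem.Str.lower) (PySem.Str.lower c) := fun c =>
        windowHit_iff ((k :: ks).map PySem.Str.lower) (PySem.Str.lower c)
      have hinner : ∀ c b, innerLoopA c (k :: ks) b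
          = anyKey ((k :: ks).map PySem.Str.lower) (PySem.Str.lower c) := fun c b => by
        rw [innerLoopA_const c k ks b, innerLoopA_eq_anyKey]
      obtain ⟨b', hb'⟩ := foldA_gen _ (k :: ks) hinner crimes [] [] false
      rw [hb']
      simp only [List.nil_append, Prod.mk.injEq]
      constructor
      · exact List.filter_congr (fun c _ => by rw [hw c])
      · exact List.filter_congr (fun c _ => by rw [hw c])
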